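-- pv_equiv track=rewrite | github.com/HCID274/MC_Servant | backend/bot/systems/mining.py | _infer_tool_requirements
-- ===== SOURCE A (Python) =====
-- from typing import Optional, List, Dict, Any
--
-- def _infer_tool_requirements(required_tools: List[str]) -> tuple[Optional[str], Optional[str]]:
--     tier_order = ["wooden", "stone", "iron", "diamond", "netherite"]
--     tool_type = None
--     min_tier = None
--
--     for tool in required_tools or []:
--         if not isinstance(tool, str):
--             continue
--         name = tool.lower()
--         parts = name.split("_")
--         if len(parts) < 2:
--             continue
--         tier = parts[0]
--         kind = parts[-1]
--
--         if tool_type is None: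
--             tool_type = kind
--         if tier in tier_order:
--             if min_tier is None or tier_order.index(tier) < tier_order.index(min_tier):
--                 min_tier = tier
--
--     if tool_type and min_tier is None:
--         min_tier = "wooden"
--
--     return tool_type, min_tier
-- ===== SOURCE B (Python) =====
-- from typing import Optional, List
--
-- def _infer_tool_requirements(required_tools: List[str]) -> tuple[Optional[str], Optional[str]]:
--     tier_order = ["wooden", "stone", "iron", "diamond", "netherite"]
--     valid = [p for p in (t.lower().split("_")
--                          for t in required_tools or [] if isinstance(t, str))
--              if len(p) >= 2]
--     tool_type = valid[0][-1] if valid else None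
--     present = {p[0] for p in valid}
--     # no index arithmetic / running minimum: walk the fixed tier ladder from the
--     # weakest up and take the first tier that any valid tool mentions
--     min_tier = next((t for t in tier_order if t in present),
--                     "wooden" if tool_type else None)
--     return tool_type, min_tier
-- ===== Notes on version B (the rewrite author's own statement) =====
-- stated objective: simpler
-- what changed: A keeps a running minimum tier via tier_order.index comparisons while scanning the input; B instead collects the set of tiers mentioned by valid tools and then scans the fixed 5-element tier ladder from weakest upward, returning the first tier present in that set, so the index arithmetic and running-min accumulator disappear.
import Mathlib
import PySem

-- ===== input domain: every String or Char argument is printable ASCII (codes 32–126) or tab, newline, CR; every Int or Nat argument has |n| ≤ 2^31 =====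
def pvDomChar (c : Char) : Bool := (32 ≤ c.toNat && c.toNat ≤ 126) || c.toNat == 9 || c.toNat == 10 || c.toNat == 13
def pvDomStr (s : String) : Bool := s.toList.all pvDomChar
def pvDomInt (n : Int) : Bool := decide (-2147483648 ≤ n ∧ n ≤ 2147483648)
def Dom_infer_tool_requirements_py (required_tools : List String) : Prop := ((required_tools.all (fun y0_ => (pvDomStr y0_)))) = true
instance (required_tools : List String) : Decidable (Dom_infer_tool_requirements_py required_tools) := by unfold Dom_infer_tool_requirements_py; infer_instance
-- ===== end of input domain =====

-- B replaces A's running-minimum over tier_order.index comparisons by a set of mentioned tiers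
-- plus a first-match scan of the fixed tier ladder; same result, no index arithmetic.

-- Python truthiness of an Optional[str] (shared semantics shim)
def pyStrOptTruthy (o : Option String) : Bool :=
  match o with
  | none => false
  | some s => !(s == "")

-- ===== PORT A =====
def tier_order_A : List String := ["wooden", "stone", "iron", "diamond", "netherite"]

-- the for-loop of A over (tool_type, min_tier)
-- (.getD "" / .getD 0 are unreachable fallbacks: parts has ≥ 2 elements in that branch, and
--  .index is only called on strings already known to be members of tier_order)
def inferLoopA : List String → Option String × Option String → Option String × Option String
  | [], st => st
  | tool :: rest, (tool_type, min_tier) =>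
    let name := PySem.Str.lower tool
    let parts := (PySem.Str.split? name "_").getD []
    if parts.length < 2 then inferLoopA rest (tool_type, min_tier)
    else
      let tier := (PySem.List.pyGet? parts 0).getD ""
      let kind := (PySem.List.pyGet? parts (-1)).getD ""
      let tool_type' := if tool_type = none then some kind else tool_type
      let min_tier' :=
        if tier_order_A.contains tier then
          match min_tier with
          | none => some tier
          | some m =>
            if (PySem.List.index? tier_order_A tier).getD 0 <
               (PySem.List.index? tier_order_A m).getD 0 then some tier else some m
        else min_tier
      inferLoopA rest (tool_type', min_tier')

def infer_tool_requirements_py (required_tools : List String) : Option String × Option String :=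
  let st := inferLoopA required_tools (none, none)
  let tool_type := st.1
  let min_tier := if pyStrOptTruthy tool_type && st.2.isNone then some "wooden" else st.2
  (tool_type, min_tier)

-- ===== PORT B =====
def tier_order_alt : List String := ["wooden", "stone", "iron", "diamond", "netherite"]

-- the parsed parts of the valid tools (the list comprehension in Source B)
def validPartsB (required_tools : List String) : List (List String) :=
  (required_tools.map (fun t => (PySem.Str.split? (PySem.Str.lower t) "_").getD [])).filter
    (fun p => 2 ≤ p.length)

-- (.getD "" is an unreachable fallback: every p in valid has ≥ 2 elements)
def infer_tool_requirements_py_alt (required_tools : List String) : Option String × Option String :=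
  let valid := validPartsB required_tools
  let tool_type := valid.head?.map (fun p => (PySem.List.pyGet? p (-1)).getD "")
  let present : PySem.Set String :=
    PySem.Set.ofList (valid.map (fun p => (PySem.List.pyGet? p 0).getD ""))
  let min_tier :=
    match tier_order_alt.find? (fun t => PySem.Set.contains present t) with
    | some t => some t
    | none => if pyStrOptTruthy tool_type then some "wooden" else none
  (tool_type, min_tier)

-- ===== PRECONDITION & SPEC =====
def Spec_infer_tool_requirements_py (required_tools : List String) (out : Option String × Option String) : Prop := out = infer_tool_requirements_py_alt required_tools
instance (required_tools : List String) (out : Option String × Option String) : Decidable (Spec_infer_tool_requirements_py required_tools out) := by unfold Spec_infer_tool_requirements_py; infer_instance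

-- ===== CLAIM (what is proved, stated in full; the proofs are below) =====
def Claim_equal_infer_tool_requirements_py : Prop := ∀ (required_tools : List String), Dom_infer_tool_requirements_py required_tools → Spec_infer_tool_requirements_py required_tools (infer_tool_requirements_py required_tools)

-- ===== LEMMAS AND PROOFS =====

-- proof-only view of one valid tool as a (tier, kind) pair
def parseToolB (tool : String) : Option (String × String) :=
  let parts := (PySem.Str.split? (PySem.Str.lower tool) "_").getD []
  if 2 ≤ parts.length then
    some ((PySem.List.pyGet? parts 0).getD "", (PySem.List.pyGet? parts (-1)).getD "")
  else none

-- min on Option Nat (none = no value yet)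
def minO : Option Nat → Option Nat → Option Nat
  | none, y => y
  | some a, none => some a
  | some a, some b => some (min a b)

-- recursive min of a list of Nats
def rmin : List Nat → Option Nat
  | [] => none
  | a :: t => minO (some a) (rmin t)

-- the tier ranks contributed by a list of tier strings
def ranksT (ts : List String) : List Nat :=
  ts.filterMap
    (fun s => if tier_order_alt.contains s then PySem.List.index? tier_order_alt s else none)

def ranksOf (l : List String) : List Nat :=
  (l.filterMap parseToolB).filterMap
    (fun p => if tier_order_alt.contains p.1 then PySem.List.index? tier_order_alt p.1 else none)

-- decode a rank back to the tier string
def gTier (ro : Option Nat) : Option String :=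
  ro.bind (fun r => PySem.List.pyGet? tier_order_alt ((r : Nat) : Int))

lemma minO_assoc (x y z : Option Nat) :
    minO x (minO y z) = minO (minO x y) z := by
  cases x <;> cases y <;> cases z <;> simp [minO, Nat.min_assoc]

lemma rmin_mem {l : List Nat} {r : Nat} (h : rmin l = some r) : r ∈ l := by
  induction l with
  | nil => simp [rmin] at h
  | cons a t ih =>
    simp only [rmin] at h
    cases ht : rmin t with
    | none =>
      rw [ht] at h
      simp only [minO, Option.some.injEq] at h
      simp [← h]
    | some b =>
      rw [ht] at h
      simp only [minO, Option.some.injEq] at h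
      rcases Nat.le_total a b with hab | hab
      · rw [Nat.min_eq_left hab] at h; simp [← h]
      · rw [Nat.min_eq_right hab] at h
        exact List.mem_cons_of_mem _ (ih (h ▸ ht))

lemma rmin_le {l : List Nat} {r : Nat} (h : rmin l = some r) : ∀ x ∈ l, r ≤ x := by
  induction l generalizing r with
  | nil => simp
  | cons a t ih =>
    intro x hx
    simp only [rmin] at h
    cases ht : rmin t with
    | none =>
      rw [ht] at h
      simp only [minO, Option.some.injEq] at h
      have : t = [] := by
        cases t with
        | nil => rfl
        | cons b u => simp [rmin, minO] at ht; cases hu : rmin u <;> rw [hu] at ht <;> simp at ht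
      subst this
      simp at hx
      omega
    | some b =>
      rw [ht] at h
      simp only [minO, Option.some.injEq] at h
      rcases List.mem_cons.mp hx with hx | hx
      · subst hx; omega
      · have := ih ht x hx; omega

lemma rmin_eq_none {l : List Nat} (h : rmin l = none) : l = [] := by
  cases l with
  | nil => rfl
  | cons a t => simp only [rmin] at h; cases ht : rmin t <;> rw [ht] at h <;> simp [minO] at h

-- a member of tier_order is one of the five literals
lemma mem_tier5 {s : String} (h : tier_order_alt.contains s = true) :
    s = "wooden" ∨ s = "stone" ∨ s = "iron" ∨ s = "diamond" ∨ s = "netherite" := by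
  simpa [tier_order_alt, List.contains_eq_mem, or_assoc] using h

lemma index5_lt {s : String} {rt : Nat} (h : PySem.List.index? tier_order_alt s = some rt) :
    rt < 5 := by
  rw [PySem.List.index?_eq_some_iff] at h
  obtain ⟨pre, suf, hl, hlen, -⟩ := h
  have h5 : tier_order_alt.length = 5 := by decide
  rw [hl] at h5
  simp at h5
  omega

lemma gTier_lt5 {r : Nat} (h : r < 5) :
    ∃ m, gTier (some r) = some m ∧ PySem.List.index? tier_order_alt m = some r := by
  interval_cases r
  · exact ⟨"wooden", by decide, by decide⟩
  · exact ⟨"stone", by decide, by decide⟩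
  · exact ⟨"iron", by decide, by decide⟩
  · exact ⟨"diamond", by decide, by decide⟩
  · exact ⟨"netherite", by decide, by decide⟩

lemma ranksT_lt5 (ts : List String) : ∀ x ∈ ranksT ts, x < 5 := by
  intro x hx
  simp only [ranksT, List.mem_filterMap] at hx
  obtain ⟨s, -, hs⟩ := hx
  split at hs
  · exact index5_lt hs
  · simp at hs

lemma mem_ranksT_iff {j : Nat} {tj : String}
    (hidx : PySem.List.index? tier_order_alt tj = some j)
    (hc : tier_order_alt.contains tj = true) (ts : List String) :
    j ∈ ranksT ts ↔ tj ∈ ts := by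
  constructor
  · intro h
    simp only [ranksT, List.mem_filterMap] at h
    obtain ⟨s, hs, h2⟩ := h
    by_cases hcs : tier_order_alt.contains s = true
    · rw [if_pos hcs] at h2
      obtain ⟨hk1, hv1, -⟩ := PySem.List.getElem_of_index?_eq_some h2
      obtain ⟨hk2, hv2, -⟩ := PySem.List.getElem_of_index?_eq_some hidx
      rw [hv1.symm.trans hv2] at hs
      exact hs
    · rw [if_neg hcs] at h2; simp at h2
  · intro h
    simp only [ranksT, List.mem_filterMap]
    exact ⟨tj, h, by rw [if_pos hc, hidx]⟩

-- BRIDGE: first tier of the ladder present among ts = decoded minimum rank of ts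
lemma find_eq_gTier (ts : List String) :
    tier_order_alt.find? (fun t => PySem.Set.contains (PySem.Set.ofList ts) t) =
      gTier (rmin (ranksT ts)) := by
  have m0 := mem_ranksT_iff (j := 0) (tj := "wooden") (by decide) (by decide) ts
  have m1 := mem_ranksT_iff (j := 1) (tj := "stone") (by decide) (by decide) ts
  have m2 := mem_ranksT_iff (j := 2) (tj := "iron") (by decide) (by decide) ts
  have m3 := mem_ranksT_iff (j := 3) (tj := "diamond") (by decide) (by decide) ts
  have m4 := mem_ranksT_iff (j := 4) (tj := "netherite") (by decide) (by decide) ts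
  cases hr : rmin (ranksT ts) with
  | none =>
    have hnil := rmin_eq_none hr
    rw [hnil] at m0 m1 m2 m3 m4
    have n0 : "wooden" ∉ ts := fun h => by simpa using m0.mpr h
    have n1 : "stone" ∉ ts := fun h => by simpa using m1.mpr h
    have n2 : "iron" ∉ ts := fun h => by simpa using m2.mpr h
    have n3 : "diamond" ∉ ts := fun h => by simpa using m3.mpr h
    have n4 : "netherite" ∉ ts := fun h => by simpa using m4.mpr h
    simp [tier_order_alt, List.find?, n0, n1, n2, n3, n4, gTier]
  | some r =>
    have hrmem := rmin_mem hr
    have hr5 : r < 5 := ranksT_lt5 ts r hrmem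
    have hle := rmin_le hr
    have hnotlt : ∀ j, j < r → j ∉ ranksT ts := by
      intro j hj hmemj
      have := hle j hmemj
      omega
    interval_cases r
    · have t0 : "wooden" ∈ ts := m0.mp hrmem
      simp [tier_order_alt, t0, gTier]
    · have t1 : "stone" ∈ ts := m1.mp hrmem
      have n0 : "wooden" ∉ ts := fun h => hnotlt 0 (by omega) (m0.mpr h)
      simp [tier_order_alt, List.find?, n0, t1, gTier]
    · have t2 : "iron" ∈ ts := m2.mp hrmem
      have n0 : "wooden" ∉ ts := fun h => hnotlt 0 (by omega) (m0.mpr h)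
      have n1 : "stone" ∉ ts := fun h => hnotlt 1 (by omega) (m1.mpr h)
      simp [tier_order_alt, List.find?, n0, n1, t2, gTier]
    · have t3 : "diamond" ∈ ts := m3.mp hrmem
      have n0 : "wooden" ∉ ts := fun h => hnotlt 0 (by omega) (m0.mpr h)
      have n1 : "stone" ∉ ts := fun h => hnotlt 1 (by omega) (m1.mpr h)
      have n2 : "iron" ∉ ts := fun h => hnotlt 2 (by omega) (m2.mpr h)
      simp [tier_order_alt, List.find?, n0, n1, n2, t3, gTier]
    · have t4 : "netherite" ∈ ts := m4.mp hrmem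
      have n0 : "wooden" ∉ ts := fun h => hnotlt 0 (by omega) (m0.mpr h)
      have n1 : "stone" ∉ ts := fun h => hnotlt 1 (by omega) (m1.mpr h)
      have n2 : "iron" ∉ ts := fun h => hnotlt 2 (by omega) (m2.mpr h)
      have n3 : "diamond" ∉ ts := fun h => hnotlt 3 (by omega) (m3.mpr h)
      simp [tier_order_alt, List.find?, n0, n1, n2, n3, t4, gTier]

-- B's valid-parts view and A's parsed pairs coincide
lemma valid_parsed (l : List String) :
    (validPartsB l).map
        (fun p => ((PySem.List.pyGet? p 0).getD "", (PySem.List.pyGet? p (-1)).getD "")) =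
      l.filterMap parseToolB := by
  induction l with
  | nil => rfl
  | cons t rest ih =>
    simp only [validPartsB, List.map_cons, List.filter_cons, List.filterMap_cons, parseToolB] at ih ⊢
    by_cases h : 2 ≤ ((PySem.Str.split? (PySem.Str.lower t) "_").getD []).length
    · simp [h, ih]
    · simp [h, ih]

-- main loop invariant: A's scan = first-of-parsed for tool_type, min-of-ranks for min_tier
set_option maxHeartbeats 1600000 in
lemma loopA_eq (l : List String) (tt : Option String) (ro : Option Nat)
    (hro : ∀ r ∈ ro, r < 5) :
    inferLoopA l (tt, gTier ro) =
      (tt.or ((l.filterMap parseToolB).head?.map Prod.snd),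
       gTier (minO ro (rmin (ranksOf l)))) := by
  induction l generalizing tt ro with
  | nil =>
    simp only [inferLoopA, ranksOf, List.filterMap_nil, rmin, List.head?_nil, Option.map_none]
    cases ro <;> cases tt <;> simp [minO, Option.or]
  | cons tool rest ih =>
    by_cases hlen : ((PySem.Str.split? (PySem.Str.lower tool) "_").getD []).length < 2
    · have hp : parseToolB tool = none := by
        simp only [parseToolB, ite_eq_right_iff]
        intro h; omega
      rw [show inferLoopA (tool :: rest) (tt, gTier ro) = inferLoopA rest (tt, gTier ro) by
        simp [inferLoopA, hlen]]
      rw [ih tt ro hro]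
      simp [ranksOf, hp]
    · set parts := (PySem.Str.split? (PySem.Str.lower tool) "_").getD [] with hparts
      set tier := (PySem.List.pyGet? parts 0).getD "" with htier
      set kind := (PySem.List.pyGet? parts (-1)).getD "" with hkind
      have hp : parseToolB tool = some (tier, kind) := by
        simp only [parseToolB, ← hparts, ← htier, ← hkind, if_pos (by omega : 2 ≤ parts.length)]
      have hlen' : ¬ ((PySem.Str.split? (PySem.Str.lower tool) "_").getD []).length < 2 := by
        rw [← hparts]; exact hlen
      have step : inferLoopA (tool :: rest) (tt, gTier ro) =
          inferLoopA rest
            ((if tt = none then some kind else tt),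
             (if tier_order_A.contains tier then
                match gTier ro with
                | none => some tier
                | some m =>
                  if (PySem.List.index? tier_order_A tier).getD 0 <
                     (PySem.List.index? tier_order_A m).getD 0 then some tier else some m
              else gTier ro)) := by
        conv_lhs => rw [inferLoopA]
        rw [if_neg hlen']
      rw [show tier_order_A = tier_order_alt from rfl] at step
      by_cases hc : tier_order_alt.contains tier = true
      · -- tier is recognised: it contributes its rank
        obtain ⟨rt, hrt⟩ : ∃ rt, PySem.List.index? tier_order_alt tier = some rt := by
          rcases mem_tier5 hc with h|h|h|h|h <;> rw [h] <;>
            first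
              | exact ⟨0, by decide⟩
              | exact ⟨1, by decide⟩
              | exact ⟨2, by decide⟩
              | exact ⟨3, by decide⟩
              | exact ⟨4, by decide⟩
        have hrt5 : rt < 5 := index5_lt hrt
        have hget : gTier (some rt) = some tier := by
          obtain ⟨m, hm, hmidx⟩ := gTier_lt5 hrt5
          obtain ⟨hk1, hv1, -⟩ := PySem.List.getElem_of_index?_eq_some hrt
          obtain ⟨hk2, hv2, -⟩ := PySem.List.getElem_of_index?_eq_some hmidx
          rw [hm, hv1.symm.trans hv2]
        have hmt : (match gTier ro with
                | none => some tier
                | some m =>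
                  if (PySem.List.index? tier_order_alt tier).getD 0 <
                     (PySem.List.index? tier_order_alt m).getD 0 then some tier else some m)
              = gTier (minO ro (some rt)) := by
          cases ro with
          | none => simpa [minO] using hget.symm
          | some r =>
            have hr5 : r < 5 := hro r rfl
            obtain ⟨m, hm, hmidx⟩ := gTier_lt5 hr5
            rw [hm]
            simp only [minO]
            by_cases hlt : rt < r
            · rw [if_pos (by rw [hrt, hmidx]; simpa using hlt)]
              rw [Nat.min_eq_right (Nat.le_of_lt hlt)]
              exact hget.symm
            · rw [if_neg (by rw [hrt, hmidx]; simpa using hlt)]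
              rw [Nat.min_eq_left (Nat.le_of_not_lt hlt)]
              exact hm.symm
        rw [step, if_pos hc, hmt,
            ih _ (minO ro (some rt)) (by
              intro x hx
              cases ro with
              | none => simp [minO] at hx; omega
              | some r => have := hro r rfl; simp [minO] at hx; omega)]
        refine Prod.ext ?_ ?_
        · cases tt <;> simp [Option.or, hp]
        · show gTier (minO (minO ro (some rt)) (rmin (ranksOf rest))) =
            gTier (minO ro (rmin (ranksOf (tool :: rest))))
          rw [show ranksOf (tool :: rest) = rt :: ranksOf rest by
            have hmem : tier ∈ tier_order_alt := by simpa [List.contains_eq_mem] using hc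
            have hidx : List.idxOf? tier tier_order_alt = some rt := by
              simpa [PySem.List.index?_eq_idxOf?] using hrt
            simp [ranksOf, hp, hmem, hidx]]
          rw [show rmin (rt :: ranksOf rest) = minO (some rt) (rmin (ranksOf rest)) from rfl,
              minO_assoc]
      · -- unrecognised tier: min_tier unchanged, no rank contributed
        rw [step, if_neg hc, ih _ ro hro]
        refine Prod.ext ?_ ?_
        · cases tt <;> simp [Option.or, hp]
        · show gTier (minO ro (rmin (ranksOf rest))) = gTier (minO ro (rmin (ranksOf (tool :: rest))))
          rw [show ranksOf (tool :: rest) = ranksOf rest by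
            have hmem : tier ∉ tier_order_alt := by simpa [List.contains_eq_mem] using hc
            simp [ranksOf, hp, hmem]]

-- ranksOf in terms of ranksT of B's tier list
lemma ranksOf_eq_ranksT (l : List String) :
    ranksOf l = ranksT ((l.filterMap parseToolB).map Prod.fst) := by
  simp [ranksOf, ranksT, List.filterMap_map, Function.comp]

-- ===== VERDICT (by name: the statement is the Claim_ definition above) =====
set_option maxHeartbeats 1600000 in
theorem infer_tool_requirements_py_spec : Claim_equal_infer_tool_requirements_py := by
  intro l _
  unfold Spec_infer_tool_requirements_py infer_tool_requirements_py infer_tool_requirements_py_alt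
  have h := loopA_eq l none none (by simp)
  have hg : gTier none = none := rfl
  rw [hg] at h
  rw [h]
  simp only [Option.none_or]
  -- identify B's tool_type and tier list with A's parsed pairs
  have htt : (validPartsB l).head?.map (fun p => (PySem.List.pyGet? p (-1)).getD "") =
      (l.filterMap parseToolB).head?.map Prod.snd := by
    rw [← valid_parsed l]
    rw [List.head?_map, Option.map_map]
    rfl
  have hts : (validPartsB l).map (fun p => (PySem.List.pyGet? p 0).getD "") =
      (l.filterMap parseToolB).map Prod.fst := by
    rw [← valid_parsed l, List.map_map]
    rfl
  rw [htt, hts, find_eq_gTier, ← ranksOf_eq_ranksT]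
  cases hr : rmin (ranksOf l) with
  | none =>
    simp [minO, gTier]
  | some r =>
    have hr5 : r < 5 := by
      have hm := rmin_mem hr
      have := ranksT_lt5 ((l.filterMap parseToolB).map Prod.fst) r
        (by rw [← ranksOf_eq_ranksT]; exact hm)
      exact this
    obtain ⟨m, hm, -⟩ := gTier_lt5 hr5
    simp only [minO, gTier, Option.bind_some] at hm ⊢
    rw [hm]
    simp
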